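-- pv_equiv track=rewrite | github.com/ronen-fr/log_to_trace | log_to_trace.py | translate_state_name
-- ===== SOURCE A (Python) =====
-- def translate_state_name(state_name: str) -> str:
--     """Translate 'Act' to 'ActiveScrubbing' in state names."""
--     parts = state_name.split('/')
--     translated = []
--     for part in parts:
--         if part == 'Act':
--             translated.append('ActiveScrubbing')
--         else:
--             translated.append(part)
--     return '/'.join(translated)
-- ===== SOURCE B (Python) =====
-- def translate_state_name(state_name: str) -> str:
--     """Translate 'Act' to 'ActiveScrubbing' in state names.
--
--     Single left-to-right scan over the characters: no split/join, no
--     intermediate list of segments.  'Act' is rewritten exactly when it is a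
--     whole slash-separated segment (preceded by start-of-string or '/',
--     followed by end-of-string or '/').
--     """
--     s = state_name
--     n = len(s)
--     out = []
--     i = 0
--     at_start = True  # are we at the start of a segment?
--     while i < n:
--         if at_start and s.startswith('Act', i) and (i + 3 == n or s[i + 3] == '/'):
--             out.append('ActiveScrubbing')
--             i += 3
--             at_start = False
--         else:
--             c = s[i]
--             out.append(c)
--             at_start = (c == '/')
--             i += 1
--     return ''.join(out)
-- ===== Notes on version B (the rewrite author's own statement) =====
-- stated objective: alternative
-- what changed: Replaces split-on-'/' / map segments / join with a single boundary-aware character scan that rewrites 'Act' in place when it is preceded by start-or-'/' and followed by end-or-'/', building the output in one pass without any intermediate segment list.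
import Mathlib
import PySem

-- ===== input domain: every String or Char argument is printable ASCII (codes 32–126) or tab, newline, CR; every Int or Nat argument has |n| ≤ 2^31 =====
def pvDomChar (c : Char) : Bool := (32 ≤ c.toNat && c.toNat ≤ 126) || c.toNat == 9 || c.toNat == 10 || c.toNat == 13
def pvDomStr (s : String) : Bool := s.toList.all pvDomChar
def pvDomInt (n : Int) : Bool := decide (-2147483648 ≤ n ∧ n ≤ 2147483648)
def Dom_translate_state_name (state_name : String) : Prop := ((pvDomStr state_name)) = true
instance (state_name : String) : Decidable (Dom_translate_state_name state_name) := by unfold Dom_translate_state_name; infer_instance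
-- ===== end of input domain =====

-- B replaces A's split('/')/map/join with a single boundary-aware character scan; same return value, no speed claim.


-- ===== PORT A =====
-- split on '/', translate each part in a loop, '/'-join (string ops on the List Char side, per PySem convention)
def translate_state_name (state_name : String) : String :=
  let parts := PySem.Chars.splitOn state_name.toList "/".toList
  let translated := parts.foldl
    (fun acc part =>
      if part = "Act".toList then acc ++ ["ActiveScrubbing".toList] else acc ++ [part]) []
  String.ofList (PySem.Chars.join "/".toList translated)

-- ===== PORT B =====
-- Source B's boundary test: s.startswith('Act', i) and (i+3 == n or s[i+3] == '/')
def pvIsAct (cs : List Char) : Bool :=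
  (cs.take 3 == "Act".toList) && (cs.drop 3 == [] || (cs.drop 3).head? == some '/')

-- Source B's while-loop as structural recursion; atStart is Source B's at_start flag
def pvScan (atStart : Bool) (cs : List Char) : List Char :=
  match cs with
  | [] => []
  | c :: rest =>
    if atStart && pvIsAct (c :: rest) then
      "ActiveScrubbing".toList ++ pvScan false ((c :: rest).drop 3)
    else
      c :: pvScan (c == '/') rest
termination_by cs.length
decreasing_by
  all_goals simp

def translate_state_name_alt (state_name : String) : String :=
  String.ofList (pvScan true state_name.toList)

-- ===== PRECONDITION & SPEC =====
def Spec_translate_state_name (state_name : String) (out : String) : Prop := out = translate_state_name_alt state_name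
instance (state_name : String) (out : String) : Decidable (Spec_translate_state_name state_name out) := by unfold Spec_translate_state_name; infer_instance

-- ===== CLAIM (what is proved, stated in full; the proofs are below) =====
def Claim_equal_translate_state_name : Prop := ∀ (state_name : String), Dom_translate_state_name state_name → Spec_translate_state_name state_name (translate_state_name state_name)

-- ===== LEMMAS AND PROOFS =====

-- proof-only recursive model of Python's split('/')
def pvSplit : List Char → List (List Char)
  | [] => [[]]
  | c :: r => if c = '/' then [] :: pvSplit r else (pvSplit r).modifyHead (c :: ·)

-- the per-segment translation A performs
def pvF (p : List Char) : List Char :=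
  if p = "Act".toList then "ActiveScrubbing".toList else p

-- the part of the output after the first segment, as a function of dropWhile's result
def pvTailScan (l : List Char) : List Char :=
  match l with
  | [] => []
  | _ :: r => '/' :: pvScan true r

def pvTailSplit (l : List Char) : List (List Char) :=
  match l with
  | [] => []
  | _ :: r => pvSplit r

theorem pv_modifyHead_id {α : Type} (l : List α) : l.modifyHead (fun x => x) = l := by
  cases l <;> simp

theorem pvSplit_ne_nil (cs : List Char) : pvSplit cs ≠ [] := by
  induction cs with
  | nil => simp [pvSplit]
  | cons c r ih =>
    simp only [pvSplit]
    split
    · simp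
    · cases hr : pvSplit r with
      | nil => exact absurd hr ih
      | cons a l => simp

theorem pv_go_spec (fuel : Nat) : ∀ (cs cur : List Char) (acc : List (List Char)),
    cs.length < fuel →
    PySem.Chars.splitOn.go ['/'] fuel cs cur acc
      = acc.reverse ++ (pvSplit cs).modifyHead (cur.reverse ++ ·) := by
  induction fuel with
  | zero => intro cs cur acc h; omega
  | succ n ih =>
    intro cs cur acc h
    cases cs with
    | nil =>
      rw [PySem.Chars.splitOn.go]
      simp [pvSplit]
      all_goals (intros; omega)
    | cons c rest =>
      by_cases hc : c = '/'
      · subst hc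
        rw [PySem.Chars.splitOn.go]
        simp only [List.isPrefixOf]
        have hstep := ih rest [] (cur.reverse :: acc) (by simp at h; omega)
        simp_all [pvSplit, pv_modifyHead_id]
      · rw [PySem.Chars.splitOn.go]
        have hpre : ['/'].isPrefixOf (c :: rest) = false := by
          simp [List.isPrefixOf]; intro h'; exact hc h'.symm
        simp only [hpre, Bool.false_eq_true, if_false]
        have hstep := ih rest (c :: cur) acc (by simp at h ⊢; omega)
        rw [hstep]
        have hcomp : ((fun x => cur.reverse ++ x) ∘ fun x : List Char => c :: x)
            = (fun x : List Char => cur.reverse ++ c :: x) := rfl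
        simp [pvSplit, hc, List.modifyHead_modifyHead, hcomp]

theorem pv_splitOn_eq (cs : List Char) :
    PySem.Chars.splitOn cs ['/'] = pvSplit cs := by
  unfold PySem.Chars.splitOn
  rw [pv_go_spec (cs.length + 1) cs [] [] (by omega)]
  simp [pv_modifyHead_id]

-- the first segment and the rest of pvSplit
theorem pvSplit_decomp (cs : List Char) :
    pvSplit cs = cs.takeWhile (· ≠ '/') :: pvTailSplit (cs.dropWhile (· ≠ '/')) := by
  induction cs with
  | nil => simp [pvSplit, pvTailSplit]
  | cons c rest ih =>
    by_cases hc : c = '/'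
    · subst hc; simp [pvSplit, pvTailSplit, List.takeWhile, List.dropWhile]
    · simp [pvSplit, List.takeWhile, List.dropWhile, hc, ih]

-- if the first segment is exactly "Act", Source B's boundary test fires
theorem pv_takeWhile_act {cs : List Char}
    (h : cs.takeWhile (· ≠ '/') = "Act".toList) : pvIsAct cs = true := by
  have hsplit : cs = "Act".toList ++ cs.dropWhile (· ≠ '/') := by
    calc cs = cs.takeWhile (· ≠ '/') ++ cs.dropWhile (· ≠ '/') :=
          (List.takeWhile_append_dropWhile).symm
      _ = "Act".toList ++ cs.dropWhile (· ≠ '/') := by rw [h]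
  cases hd : cs.dropWhile (· ≠ '/') with
  | nil => rw [hsplit, hd]; rfl
  | cons d r =>
    by_cases hdd : d = '/'
    · subst hdd; rw [hsplit, hd]; rfl
    · exfalso
      have h5 : cs.dropWhile (· ≠ '/') = r.dropWhile (· ≠ '/') := by
        conv_lhs => rw [hsplit, hd]
        simp [List.dropWhile, hdd]
      rw [hd] at h5
      have h6 := List.length_dropWhile_le (fun x => decide (x ≠ '/')) r
      rw [← h5] at h6
      simp at h6

-- one step of pvScan in the middle of a segment
theorem pvScan_false (cs : List Char) :
    pvScan false cs = cs.takeWhile (· ≠ '/') ++ pvTailScan (cs.dropWhile (· ≠ '/')) := by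
  induction cs with
  | nil => simp [pvScan, pvTailScan]
  | cons c rest ih =>
    by_cases hc : c = '/'
    · subst hc
      rw [pvScan]
      simp [pvTailScan, List.takeWhile, List.dropWhile]
    · rw [pvScan]
      simp only [Bool.false_and, Bool.false_eq_true, if_false]
      have hcb : (c == '/') = false := by simp [hc]
      rw [hcb, ih]
      simp [List.takeWhile, List.dropWhile, hc]

-- one step of pvScan at a segment boundary
theorem pvScan_true_step (cs : List Char) :
    pvScan true cs = pvF (cs.takeWhile (· ≠ '/')) ++ pvTailScan (cs.dropWhile (· ≠ '/')) := by
  by_cases hact : pvIsAct cs = true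
  · have hterm := hact
    simp only [pvIsAct, Bool.and_eq_true, Bool.or_eq_true, beq_iff_eq] at hterm
    obtain ⟨htake, hb⟩ := hterm
    have hcs : cs = 'A' :: 'c' :: 't' :: cs.drop 3 := by
      calc cs = cs.take 3 ++ cs.drop 3 := (List.take_append_drop 3 cs).symm
        _ = 'A' :: 'c' :: 't' :: cs.drop 3 := by rw [htake]; rfl
    rcases hb with hnil | hget
    · rw [hcs, hnil]
      have e1 : pvScan true ['A', 'c', 't'] = "ActiveScrubbing".toList ++ pvScan false [] := by
        conv_lhs => rw [pvScan]
        rfl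
      have e2 : pvScan false [] = [] := by rw [pvScan]
      rw [e1, e2]
      decide
    · cases hd : cs.drop 3 with
      | nil => rw [hd] at hget; simp at hget
      | cons d r =>
        rw [hd] at hget
        have hds : d = '/' := by simpa using hget
        subst hds
        rw [hcs, hd]
        rw [pvScan]
        have hact'' : pvIsAct ('A' :: 'c' :: 't' :: '/' :: r) = true := rfl
        simp only [hact'', Bool.and_self, if_true]
        have hfs : pvScan false ('/' :: r) = '/' :: pvScan true r := by
          rw [pvScan]; rfl
        have hdrop : ('A' :: 'c' :: 't' :: '/' :: r).drop 3 = '/' :: r := rfl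
        rw [hdrop, hfs]
        simp [pvTailScan, pvF, List.takeWhile, List.dropWhile]
  · cases cs with
    | nil => simp [pvScan, pvTailScan, pvF]
    | cons c rest =>
      rw [pvScan]
      simp only [hact, Bool.and_false, Bool.false_eq_true, if_false]
      by_cases hc : c = '/'
      · subst hc
        simp [pvTailScan, List.takeWhile, List.dropWhile, pvF]
      · have hcb : (c == '/') = false := by simp [hc]
        rw [hcb, pvScan_false rest]
        have hne : (c :: rest).takeWhile (· ≠ '/') ≠ "Act".toList := by
          intro h; exact hact (pv_takeWhile_act h)
        have hseg : (c :: rest).takeWhile (· ≠ '/') = c :: rest.takeWhile (· ≠ '/') := by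
          simp [List.takeWhile, hc]
        rw [hseg] at hne
        have hfne : pvF (c :: rest.takeWhile (· ≠ '/')) = c :: rest.takeWhile (· ≠ '/') := by
          simp only [pvF, if_neg hne]
        simp only [hseg, hfne]
        have hdw : (c :: rest).dropWhile (· ≠ '/') = rest.dropWhile (· ≠ '/') := by
          simp [List.dropWhile, hc]
        rw [hdw]
        simp

-- the whole scan equals '/'-join of the translated segments
theorem pv_main (n : Nat) : ∀ cs : List Char, cs.length ≤ n →
    pvScan true cs = PySem.Chars.join ['/'] ((pvSplit cs).map pvF) := by
  induction n with
  | zero =>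
    intro cs h
    have hnil : cs = [] := List.length_eq_zero_iff.mp (by omega)
    subst hnil
    have e2 : pvScan true [] = [] := by rw [pvScan]
    rw [e2]
    decide
  | succ n ih =>
    intro cs h
    rw [pvScan_true_step, pvSplit_decomp]
    cases hd : cs.dropWhile (· ≠ '/') with
    | nil =>
      simp [pvTailScan, pvTailSplit, PySem.Chars.join, List.intercalate]
    | cons d r =>
      have hr : r.length ≤ n := by
        have h1 : (cs.dropWhile (· ≠ '/')).length ≤ cs.length := List.length_dropWhile_le _ _
        rw [hd] at h1; simp at h1; omega
      simp only [pvTailScan, pvTailSplit]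
      rw [ih r hr]
      cases hmap : (pvSplit r).map pvF with
      | nil => exact absurd (List.map_eq_nil_iff.mp hmap) (pvSplit_ne_nil r)
      | cons a l =>
        simp [hmap, PySem.Chars.join, List.intercalate]

-- A's foldl loop builds exactly (pvSplit cs).map pvF
theorem pv_foldl_eq (parts : List (List Char)) :
    parts.foldl (fun acc part =>
      if part = "Act".toList then acc ++ ["ActiveScrubbing".toList] else acc ++ [part]) []
    = parts.map pvF := by
  have hfun : (fun (acc : List (List Char)) part =>
      if part = "Act".toList then acc ++ ["ActiveScrubbing".toList] else acc ++ [part])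
      = fun acc part => acc ++ [pvF part] := by
    funext acc part
    by_cases h : part = ['A', 'c', 't']
    · simp [pvF, h]
    · simp [pvF, h]
  rw [hfun]
  simpa using PySem.List.foldl_append_singleton_eq_map pvF parts []

-- ===== VERDICT (by name: the statement is the Claim_ definition above) =====
theorem translate_state_name_spec : Claim_equal_translate_state_name := by
  intro s _
  simp only [Spec_translate_state_name, translate_state_name, translate_state_name_alt]
  have h1 : "/".toList = ['/'] := rfl
  rw [h1, pv_splitOn_eq, pv_foldl_eq, pv_main s.toList.length s.toList le_rfl]
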